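-- pv_equiv track=rewrite | github.com/iotaaxel/gauntlet | shopping.py | shopping
-- ===== SOURCE A (Python) =====
-- def shopping(products, shopping_list):
--     # Create a dictionary to map products to departments
--     product_to_department = {}
--     for product, department in products:
--         product_to_department[product] = department
--
--     # Determine the number of department visits in the original order
--     original_visits = 0
--     last_department = None
--     for item in shopping_list:
--         department = product_to_department[item]
--         if department != last_department:
--             original_visits += 1
--             last_department = department
--
--     # Determine the number of department visits in the optimized order
--     departments = set(product_to_department[item] for item in shopping_list)
--     optimized_visits = len(departments)
--
--     # Calculate the time saved in terms of department visits eliminated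
--     time_saved = original_visits - optimized_visits
--
--     return time_saved
-- ===== SOURCE B (Python) =====
-- def shopping(products, shopping_list):
--     # Count the saved visits directly: a visit is saved exactly when a new run
--     # starts in a department that has already been visited before.
--     d = dict(products)
--     seen = set()
--     saved = 0
--     prev = None
--     for item in shopping_list:
--         dept = d[item]
--         if dept != prev and dept in seen:
--             saved += 1
--         seen.add(dept)
--         prev = dept
--     return saved
-- ===== Notes on version B (the rewrite author's own statement) =====
-- stated objective: alternative
-- what changed: B never computes the two visit counts: instead of counting runs and subtracting the distinct-department count, it counts the saved visits directly in one pass by maintaining a seen-set and incrementing only when a run starts in a department already visited before.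
import Mathlib
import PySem

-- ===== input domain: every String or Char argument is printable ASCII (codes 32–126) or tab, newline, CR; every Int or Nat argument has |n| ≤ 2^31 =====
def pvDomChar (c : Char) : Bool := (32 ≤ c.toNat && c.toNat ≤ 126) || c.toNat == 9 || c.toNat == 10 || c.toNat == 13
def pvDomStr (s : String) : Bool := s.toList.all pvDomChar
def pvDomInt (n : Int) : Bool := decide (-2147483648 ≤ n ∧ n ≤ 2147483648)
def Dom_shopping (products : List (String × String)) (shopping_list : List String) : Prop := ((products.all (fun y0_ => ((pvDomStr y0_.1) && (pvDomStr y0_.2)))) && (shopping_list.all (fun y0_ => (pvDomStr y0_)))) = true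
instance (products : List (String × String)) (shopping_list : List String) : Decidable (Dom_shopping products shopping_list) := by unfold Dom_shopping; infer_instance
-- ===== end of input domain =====

-- One line: instead of counting original and optimized visits and subtracting, B counts the
-- saved visits directly in one pass (a run start in an already-seen department); alternative.

-- ===== PORT A =====
def shopping (products : List (String × String)) (shopping_list : List String) : Int :=
  -- product_to_department = {}; for product, department in products: ...
  let p2d : PySem.Dict String String :=
    products.foldl (fun d p => d.insert p.1 p.2) PySem.Dict.empty
  -- original_visits = 0; last_department = None; for item in shopping_list: ...
  -- (lookup p2d[item] is total here via getD; Pre_ guarantees the key is present)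
  let st : Int × Option String :=
    shopping_list.foldl
      (fun (acc : Int × Option String) item =>
        let department := p2d.getD item ""
        if acc.2 ≠ some department then (acc.1 + 1, some department) else acc)
      (0, none)
  -- departments = set(p2d[item] for item in shopping_list)
  let departments : PySem.Set String :=
    PySem.Set.ofList (shopping_list.map (fun item => p2d.getD item ""))
  st.1 - (departments.length : Int)

-- ===== PORT B =====
def shopping_alt (products : List (String × String)) (shopping_list : List String) : Int :=
  -- d = dict(products)
  let d : PySem.Dict String String := PySem.Dict.ofList products
  -- seen = set(); saved = 0; prev = None; for item in shopping_list: ...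
  let st : PySem.Set String × Int × Option String :=
    shopping_list.foldl
      (fun (acc : PySem.Set String × Int × Option String) item =>
        let dept := d.getD item ""
        let saved := if some dept ≠ acc.2.2 ∧ acc.1.contains dept = true
                     then acc.2.1 + 1 else acc.2.1
        (acc.1.add dept, saved, some dept))
      (PySem.Set.empty, 0, none)
  st.2.1

-- ===== PRECONDITION & SPEC =====
-- Pre_ excludes exactly the inputs on which A raises KeyError: a shopping-list item absent
-- from the products mapping.
def Pre_shopping (products : List (String × String)) (shopping_list : List String) : Prop :=
  shopping_list.all (fun item => products.any (fun p => p.1 == item)) = true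
instance (products : List (String × String)) (shopping_list : List String) : Decidable (Pre_shopping products shopping_list) := by unfold Pre_shopping; infer_instance
def pvWitness_shopping : (List (String × String)) × List String :=
  ([("milk", "dairy"), ("bread", "bakery")], ["milk", "bread", "milk"])

def Spec_shopping (products : List (String × String)) (shopping_list : List String) (out : Int) : Prop := out = shopping_alt products shopping_list
instance (products : List (String × String)) (shopping_list : List String) (out : Int) : Decidable (Spec_shopping products shopping_list out) := by unfold Spec_shopping; infer_instance

-- ===== CLAIM (what is proved, stated in full; the proofs are below) =====
def Claim_equal_shopping : Prop := ∀ (products : List (String × String)) (shopping_list : List String), Dom_shopping products shopping_list → Pre_shopping products shopping_list → Spec_shopping products shopping_list (shopping products shopping_list)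

-- ===== LEMMAS AND PROOFS =====

-- A's loop body, on the department value itself
def pvStep (acc : Int × Option String) (department : String) : Int × Option String :=
  if acc.2 ≠ some department then (acc.1 + 1, some department) else acc

-- B's loop body, on the department value itself
def pvStepB (acc : PySem.Set String × Int × Option String) (dept : String) :
    PySem.Set String × Int × Option String :=
  let saved := if some dept ≠ acc.2.2 ∧ acc.1.contains dept = true
               then acc.2.1 + 1 else acc.2.1
  (acc.1.add dept, saved, some dept)

-- number of run starts in l given the previous department
def pvRuns (prev : Option String) : List String → Int
  | [] => 0
  | x :: t => (if some x ≠ prev then 1 else 0) + pvRuns (some x) t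

-- number of elements of l not yet in seen (first occurrences relative to seen)
def pvNew (seen : PySem.Set String) : List String → Int
  | [] => 0
  | x :: t => (if x ∈ seen then 0 else 1) + pvNew (PySem.Set.add seen x) t

theorem pvRuns_foldl (l : List String) : ∀ (prev : Option String) (c : Int),
    (l.foldl pvStep (c, prev)).1 = c + pvRuns prev l := by
  induction l with
  | nil => intro prev c; simp [pvRuns]
  | cons x t ih =>
    intro prev c
    by_cases h : prev = some x
    · simp [pvStep, pvRuns, h, ih]
    · simp only [List.foldl_cons, pvStep]
      rw [if_pos (show (c, prev).2 ≠ some x from h)]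
      rw [ih]
      simp only [pvRuns]
      rw [if_pos (show some x ≠ prev from fun e => h e.symm)]
      ring

theorem pvNew_eq (l : List String) : ∀ (seen : PySem.Set String),
    pvNew seen l = ((PySem.Set.update seen l).length : Int) - (seen.length : Int) := by
  induction l with
  | nil => intro seen; simp [pvNew, PySem.Set.update]
  | cons x t ih =>
    intro seen
    rw [PySem.Set.update_cons]
    by_cases h : x ∈ seen
    · simp [pvNew, h, ih]
    · simp only [pvNew, h, ih (PySem.Set.add seen x)]
      rw [PySem.Set.add_of_not_mem h]
      simp
      ring

theorem pvB_main (l : List String) : ∀ (seen : PySem.Set String) (saved : Int)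
    (prev : Option String), (∀ y, prev = some y → y ∈ seen) →
    (l.foldl pvStepB (seen, saved, prev)).2.1
      = saved + pvRuns prev l - pvNew seen l := by
  induction l with
  | nil => intro seen saved prev _; simp [pvRuns, pvNew]
  | cons x t ih =>
    intro seen saved prev hc
    have hcons : ∀ y, (some x : Option String) = some y → y ∈ PySem.Set.add seen x := by
      intro y hy
      cases hy
      simp [PySem.Set.mem_add]
    simp only [List.foldl_cons, pvStepB]
    by_cases hmem : x ∈ seen
    · by_cases hp : prev = some x
      · -- same run, already seen: nothing changes
        rw [if_neg (by simp [hp])]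
        rw [ih _ _ _ hcons]
        simp [pvRuns, pvNew, hp, hmem]
      · -- new run of an already-seen department: one visit saved
        rw [if_pos ⟨show some x ≠ prev from fun e => hp e.symm, by simp [hmem]⟩]
        rw [ih _ _ _ hcons]
        simp only [pvRuns, pvNew]
        rw [if_pos (show some x ≠ prev from fun e => hp e.symm), if_pos hmem]
        ring
    · -- first occurrence of this department
      have hp : prev ≠ some x := fun e => hmem (hc x e)
      rw [if_neg (by simp [hmem])]
      rw [ih _ _ _ hcons]
      simp only [pvRuns, pvNew]
      rw [if_pos (show some x ≠ prev from fun e => hp e.symm), if_neg hmem]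
      ring

-- ===== VERDICT (by name: the statement is the Claim_ definition above) =====
theorem shopping_spec : Claim_equal_shopping := by
  intro products sl _ _
  show shopping products sl = shopping_alt products sl
  have h1 : shopping products sl
      = (List.foldl (fun (acc : Int × Option String) item =>
            pvStep acc ((PySem.Dict.ofList products).getD item ""))
          ((0 : Int), (none : Option String)) sl).1
        - ((PySem.Set.ofList (sl.map (fun item =>
            (PySem.Dict.ofList products).getD item ""))).length : Int) := rfl
  have h2 : shopping_alt products sl
      = (List.foldl (fun (acc : PySem.Set String × Int × Option String) item =>
            pvStepB acc ((PySem.Dict.ofList products).getD item ""))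
          (PySem.Set.empty, (0 : Int), (none : Option String)) sl).2.1 := rfl
  rw [h1, h2]
  rw [show List.foldl (fun (acc : Int × Option String) item =>
          pvStep acc ((PySem.Dict.ofList products).getD item ""))
        ((0 : Int), (none : Option String)) sl
      = List.foldl pvStep ((0 : Int), (none : Option String))
          (sl.map (fun item => (PySem.Dict.ofList products).getD item ""))
      from List.foldl_map.symm]
  rw [show List.foldl (fun (acc : PySem.Set String × Int × Option String) item =>
          pvStepB acc ((PySem.Dict.ofList products).getD item ""))
        (PySem.Set.empty, (0 : Int), (none : Option String)) sl
      = List.foldl pvStepB (PySem.Set.empty, (0 : Int), (none : Option String))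
          (sl.map (fun item => (PySem.Dict.ofList products).getD item ""))
      from List.foldl_map.symm]
  rw [pvRuns_foldl, pvB_main _ PySem.Set.empty 0 none (by intro y h; cases h)]
  rw [pvNew_eq]
  simp [PySem.Set.empty, PySem.Set.update_nil_left]
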